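-- pv_equiv track=rewrite | github.com/Rosariofb/concursopython | ordenarpositivos.py | ordena_positivos
-- ===== SOURCE A (Python) =====
-- def ordena_positivos(lista):
--     positivos=list(sorted(filter(lambda x: x > 0, lista)))
--     nueva_lista=lista
--     l=len(lista)
--     j=0
--     for i in range(l):
--         if lista[i] > 0:
--             nueva_lista[i]=positivos[j]
--             j+=1
--     return(nueva_lista)
-- ===== SOURCE B (Python) =====
-- def ordena_positivos(lista):
--     # Selection sort restricted to positive slots: repeatedly pull the minimum
--     # remaining positive to the front positive slot, swapping the displaced
--     # value into the slot the minimum came from. No global sort, no position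
--     # table. Mutates lista in place (lista[:] = ...) like A does.
--     out = []
--     xs = lista[:]
--     while xs:
--         x, rest = xs[0], xs[1:]
--         if x <= 0:
--             out.append(x)
--             xs = rest
--             continue
--         menores = [y for y in rest if 0 < y < x]
--         if not menores:
--             out.append(x)
--             xs = rest
--             continue
--         v = min(menores)
--         rest[rest.index(v)] = x
--         out.append(v)
--         xs = rest
--     lista[:] = out
--     return lista
-- ===== Notes on version B (the rewrite author's own statement) =====
-- stated objective: alternative
-- what changed: A sorts the positive values once and scatters them back over the positive slots in a counter-driven scan; B never builds a sorted list: it is a recursive selection sort restricted to positive slots, repeatedly pulling the minimum remaining positive to the front positive slot and swapping the displaced value into the slot the minimum came from.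
import Mathlib
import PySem

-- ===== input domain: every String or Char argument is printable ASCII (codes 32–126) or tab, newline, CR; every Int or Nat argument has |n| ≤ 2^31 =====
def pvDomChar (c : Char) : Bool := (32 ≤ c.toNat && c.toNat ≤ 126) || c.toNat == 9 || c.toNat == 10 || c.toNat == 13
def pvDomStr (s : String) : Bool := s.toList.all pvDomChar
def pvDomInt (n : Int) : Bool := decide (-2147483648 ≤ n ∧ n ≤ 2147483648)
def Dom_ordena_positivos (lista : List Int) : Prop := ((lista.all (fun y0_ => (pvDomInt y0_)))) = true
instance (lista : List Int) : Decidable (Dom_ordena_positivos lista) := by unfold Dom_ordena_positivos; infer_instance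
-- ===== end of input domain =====

-- B replaces A's sort-then-scatter by a selection sort restricted to the
-- positive slots (repeatedly pull the minimum remaining positive forward, swapping the
-- displaced value back); objective: alternative algorithm, O(n^2) vs A's O(n log n).
-- Both A and B mutate the argument list in place in Python and return that same object;
-- the equivalence proved here is about the returned value.

-- ===== PORT A =====
-- Indexing lista[i] (i ∈ range(len)) and positivos[j] is always in range in A
-- (j never exceeds the number of positives), so getD is exact here.
def ordena_positivos (lista : List Int) : List Int :=
  let positivos := PySem.List.sorted (lista.filter (fun x => decide (x > 0))) (fun x => x) false
  let l := lista.length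
  let res := (List.range l).foldl
    (fun (st : List Int × Nat) i =>
      if st.1.getD i 0 > 0 then (st.1.set i (positivos.getD st.2 0), st.2 + 1) else st)
    (lista, 0)
  res.1

-- ===== PORT B =====
-- The while loop of Source B: state (xs, out); out is the accumulator 'out'.
-- In the selection branch: menores is nonempty, so min(menores) is defined
-- (getD 0 exact under the guard), and v ∈ menores ⊆ rest, so rest.index(v)
-- is in range (getD 0 exact).
def selLoop : List Int → List Int → List Int
  | [], out => out
  | x :: rest, out =>
    if x ≤ 0 then selLoop rest (out ++ [x])
    else
      let menores := rest.filter (fun y => decide (0 < y) && decide (y < x))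
      if menores.isEmpty then selLoop rest (out ++ [x])
      else
        let v := (PySem.List.min? menores (fun y => y)).getD 0
        let k := (PySem.List.index? rest v).getD 0
        selLoop (rest.set k x) (out ++ [v])
  termination_by xs _ => xs.length
  decreasing_by all_goals simp [List.length_set]

-- lista[:] = out; return lista — the returned value is the accumulated out.
def ordena_positivos_alt (lista : List Int) : List Int := selLoop lista []

-- ===== PRECONDITION & SPEC =====
def Spec_ordena_positivos (lista : List Int) (out : List Int) : Prop := out = ordena_positivos_alt lista
instance (lista : List Int) (out : List Int) : Decidable (Spec_ordena_positivos lista out) := by unfold Spec_ordena_positivos; infer_instance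

-- ===== CLAIM (what is proved, stated in full; the proofs are below) =====
def Claim_equal_ordena_positivos : Prop := ∀ (lista : List Int), Dom_ordena_positivos lista → Spec_ordena_positivos lista (ordena_positivos lista)

-- ===== LEMMAS AND PROOFS =====

-- Proof helper: the recursive (non-accumulator) form of Source B's selection loop.
def selPos : List Int → List Int
  | [] => []
  | x :: rest =>
    if x ≤ 0 then x :: selPos rest
    else
      let menores := rest.filter (fun y => decide (0 < y) && decide (y < x))
      if menores.isEmpty then x :: selPos rest
      else
        let v := (PySem.List.min? menores (fun y => y)).getD 0
        let k := (PySem.List.index? rest v).getD 0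
        v :: selPos (rest.set k x)
  termination_by xs => xs.length
  decreasing_by all_goals simp [List.length_set]

-- Canonical form both programs compute: replace each positive element by the next value of vs.
def fillPos : List Int → List Int → List Int
  | [], _ => []
  | x :: xs, vs => if x > 0 then vs.headD 0 :: fillPos xs vs.tail else x :: fillPos xs vs

theorem headD_drop (l : List Int) : ∀ (j : Nat) (d : Int), (l.drop j).headD d = l.getD j d := by
  induction l with
  | nil => intro j d; cases j <;> simp [List.getD]
  | cons x xs ih => intro j d; cases j <;> simp [List.getD]

theorem loopA (positivos : List Int) :
    ∀ (suf pre : List Int) (j : Nat),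
      (suf.filter (fun x => decide (x > 0))).length ≤ (positivos.drop j).length →
      ((List.range' pre.length suf.length).foldl
        (fun (st : List Int × Nat) i =>
          if st.1.getD i 0 > 0 then (st.1.set i (positivos.getD st.2 0), st.2 + 1) else st)
        (pre ++ suf, j)).1
      = pre ++ fillPos suf (positivos.drop j) := by
  intro suf
  induction suf with
  | nil => intro pre j _; simp [fillPos]
  | cons x xs ih =>
    intro pre j hcnt
    rw [List.length_cons, List.range'_succ, List.foldl_cons]
    by_cases hx : x > 0
    · have hget : (pre ++ x :: xs).getD pre.length 0 = x := by
        simp [List.getD]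
      have hlen : j < positivos.length := by
        have : 0 < (positivos.drop j).length := by
          simp [hx] at hcnt ⊢; omega
        simp at this; omega
      have hset : (pre ++ x :: xs).set pre.length (positivos.getD j 0)
          = (pre ++ [positivos.getD j 0]) ++ xs := by
        rw [List.set_append_right _ _ (Nat.le_refl _)]
        simp
      have hcnt' : (xs.filter (fun x => decide (x > 0))).length ≤ (positivos.drop (j+1)).length := by
        simp [hx] at hcnt
        simp; omega
      simp only [hget, hx, if_pos, hset]
      have := ih (pre ++ [positivos.getD j 0]) (j + 1) hcnt'
      simp only [List.length_append, List.length_cons, List.length_nil] at this ⊢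
      rw [show pre.length + 1 = pre.length + [positivos.getD j 0].length by simp] at this
      rw [show pre.length + [positivos.getD j 0].length = pre.length + 1 by simp] at this
      rw [this]
      have hne : positivos.drop j ≠ [] := by
        intro h; rw [h] at hcnt; simp [hx] at hcnt
      obtain ⟨v, vs, hv⟩ := List.exists_cons_of_ne_nil hne
      have hv0 : v = positivos.getD j 0 := by
        have := headD_drop positivos j 0; rw [hv] at this; simpa using this
      have htail : positivos.drop (j+1) = vs := by
        rw [← List.tail_drop, hv, List.tail_cons]
      rw [hv, htail, hv0]
      simp [fillPos, hx]
    · have hget : (pre ++ x :: xs).getD pre.length 0 = x := by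
        simp [List.getD]
      have hcnt' : (xs.filter (fun x => decide (x > 0))).length ≤ (positivos.drop j).length := by
        simp [hx] at hcnt; simpa using hcnt
      simp only [hget, hx, if_false]
      have := ih (pre ++ [x]) j hcnt'
      simp only [List.length_append, List.length_cons, List.length_nil] at this ⊢
      rw [show pre.length + 1 = pre.length + [x].length by simp] at this
      rw [show pre.length + [x].length = pre.length + 1 by simp] at this
      rw [show (pre ++ x :: xs) = (pre ++ [x]) ++ xs by simp] at *
      rw [this]
      simp [fillPos, hx]

-- fillPos ignores the value stored in a positive slot.
theorem fillPos_swap_pos :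
    ∀ (pre suf : List Int) (a b : Int), 0 < a → 0 < b → ∀ vs,
      fillPos (pre ++ a :: suf) vs = fillPos (pre ++ b :: suf) vs := by
  intro pre
  induction pre with
  | nil => intro suf a b ha hb vs; simp [fillPos, ha, hb]
  | cons p pre' ih =>
    intro suf a b ha hb vs
    by_cases hp : p > 0 <;> simp [fillPos, hp, ih suf a b ha hb]

-- A sorted permutation of the positives of xs, fed slot-by-slot, is what selPos computes.
theorem selPos_eq_fillPos :
    ∀ (n : Nat) (xs s : List Int), xs.length ≤ n →
      s.Perm (xs.filter (fun x => decide (x > 0))) → s.Pairwise (· ≤ ·) →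
      selPos xs = fillPos xs s := by
  intro n
  induction n with
  | zero =>
    intro xs s hlen hperm _
    have hxs : xs = [] := List.eq_nil_of_length_eq_zero (Nat.le_zero.mp hlen)
    subst hxs
    have : s = [] := by simpa using hperm.eq_nil
    simp [selPos, fillPos]
  | succ n ih =>
    intro xs s hlen hperm hsort
    cases xs with
    | nil =>
      have : s = [] := by simpa using hperm.eq_nil
      simp [selPos, fillPos]
    | cons x rest =>
      have hrlen : rest.length ≤ n := by simpa using hlen
      by_cases hx : x ≤ 0
      · have hfil : (x :: rest).filter (fun x => decide (x > 0))
            = rest.filter (fun x => decide (x > 0)) := by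
          simp [show ¬ x > 0 by omega]
        rw [selPos]
        rw [if_pos hx]
        rw [ih rest s hrlen (hfil ▸ hperm) hsort]
        simp [fillPos, show ¬ x > 0 by omega]
      · rw [Int.not_le] at hx
        have hfil : (x :: rest).filter (fun x => decide (x > 0))
            = x :: rest.filter (fun x => decide (x > 0)) := by
          simp [hx]
        set F := rest.filter (fun x => decide (x > 0)) with hF
        -- s is nonempty
        have hsne : s ≠ [] := by
          intro h
          rw [h, hfil] at hperm
          exact (List.cons_ne_nil _ _) hperm.symm.eq_nil
        obtain ⟨h0, t, hs⟩ := List.exists_cons_of_ne_nil hsne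
        have hmemF : ∀ y ∈ x :: F, y ∈ s := by
          intro y hy
          exact hperm.mem_iff.mpr (by rw [hfil] at *; exact hy)
        have hhead_le : ∀ y ∈ s, h0 ≤ y := by
          intro y hy
          rw [hs, List.mem_cons] at hy
          rcases hy with hy | hy
          · omega
          · exact (List.pairwise_cons.mp (hs ▸ hsort)).1 y hy
        have hh0mem : h0 ∈ x :: F := by
          have : h0 ∈ s := by rw [hs]; simp
          have := hperm.mem_iff.mp this
          rwa [hfil] at this
        rw [selPos]
        rw [if_neg (by omega)]
        by_cases hmen : (rest.filter (fun y => decide (0 < y) && decide (y < x))).isEmpty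
        · -- no positive in rest below x: x is minimal among x :: F
          have hxmin : ∀ y ∈ x :: F, x ≤ y := by
            intro y hy
            rcases List.mem_cons.mp hy with hy | hy
            · omega
            · have hyp : 0 < y := by
                have := List.of_mem_filter hy; simpa using this
              by_contra hlt
              rw [Int.not_le] at hlt
              have : y ∈ rest.filter (fun y => decide (0 < y) && decide (y < x)) := by
                refine List.mem_filter.mpr ⟨List.mem_of_mem_filter hy, ?_⟩
                simp [hyp, hlt]
              rw [List.isEmpty_iff] at hmen
              simp [hmen] at this
          have hh0 : h0 = x := by
            have h1 : h0 ≤ x := hhead_le x (hmemF x (by simp))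
            have h2 : x ≤ h0 := hxmin h0 hh0mem
            omega
          have htperm : t.Perm F := by
            have := hperm; rw [hs, hfil, hh0] at this
            exact this.cons_inv
          have htsort : t.Pairwise (· ≤ ·) := (List.pairwise_cons.mp (hs ▸ hsort)).2
          rw [if_pos hmen]
          rw [ih rest t hrlen htperm htsort]
          rw [hs, hh0]
          simp [fillPos, hx]
        · -- selection: v = min of menores is the global min of x :: F
          rw [if_neg hmen]
          set menores := rest.filter (fun y => decide (0 < y) && decide (y < x)) with hmen_def
          have hmne : menores ≠ [] := by
            intro h; rw [h] at hmen; simp at hmen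
          obtain ⟨v, hvsome⟩ : ∃ v, PySem.List.min? menores (fun y => y) = some v := by
            cases hh : PySem.List.min? menores (fun y => y) with
            | none => exact absurd ((PySem.List.min?_eq_none_iff _ _).mp hh) hmne
            | some v => exact ⟨v, rfl⟩
          have hvmem : v ∈ menores := PySem.List.min?_mem hvsome
          have hvmin : ∀ y ∈ menores, v ≤ y := fun y hy => PySem.List.min?_isMin hvsome y hy
          have hvrest : v ∈ rest := List.mem_of_mem_filter hvmem
          have hvprop : 0 < v ∧ v < x := by
            have := List.of_mem_filter hvmem; simp at this; exact this
          -- v is minimal among x :: F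
          have hvglobal : ∀ y ∈ x :: F, v ≤ y := by
            intro y hy
            rcases List.mem_cons.mp hy with hy | hy
            · omega
            · have hyp : 0 < y := by
                have := List.of_mem_filter hy; simpa using this
              by_cases hyx : y < x
              · exact hvmin y (List.mem_filter.mpr ⟨List.mem_of_mem_filter hy, by simp [hyp, hyx]⟩)
              · omega
          have hh0v : h0 = v := by
            have h1 : h0 ≤ v := hhead_le v (hmemF v (by
              have : v ∈ F := List.mem_filter.mpr ⟨hvrest, by simp [hvprop.1]⟩
              simp [this]))
            have h2 : v ≤ h0 := hvglobal h0 hh0mem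
            omega
          -- the index where v sits in rest
          obtain ⟨k, hksome⟩ : ∃ k, PySem.List.index? rest v = some k := by
            cases hh : PySem.List.index? rest v with
            | none => exact absurd ((PySem.List.index?_eq_none_iff _ _).mp hh) (by simp [hvrest])
            | some k => exact ⟨k, rfl⟩
          obtain ⟨pre, suf, hrest, hklen, hvpre⟩ := (PySem.List.index?_eq_some_iff _ _ _).mp hksome
          have hset : rest.set k x = pre ++ x :: suf := by
            rw [hrest, ← hklen, List.set_append_right _ _ (Nat.le_refl _)]
            simp
          -- permutation bookkeeping
          have hFsplit : F = pre.filter (fun x => decide (x > 0)) ++ v :: suf.filter (fun x => decide (x > 0)) := by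
            rw [hF, hrest]
            simp [List.filter_append, hvprop.1]
          have hF'split : (rest.set k x).filter (fun x => decide (x > 0))
              = pre.filter (fun x => decide (x > 0)) ++ x :: suf.filter (fun x => decide (x > 0)) := by
            rw [hset]
            simp [List.filter_append, hx]
          have htperm : t.Perm ((rest.set k x).filter (fun x => decide (x > 0))) := by
            have hp1 : s.Perm (x :: F) := by rw [hfil] at hperm; exact hperm
            rw [hs, hh0v, hFsplit] at hp1
            have hp2 : (x :: (pre.filter (fun x => decide (x > 0)) ++ v :: suf.filter (fun x => decide (x > 0)))).Perm
                (v :: (x :: (pre.filter (fun x => decide (x > 0)) ++ suf.filter (fun x => decide (x > 0))))) := by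
              exact (List.Perm.cons x List.perm_middle).trans (List.Perm.swap _ _ _)
            have hp3 := (hp1.trans hp2).cons_inv
            rw [hF'split]
            exact hp3.trans (List.perm_middle).symm
          have htsort : t.Pairwise (· ≤ ·) := (List.pairwise_cons.mp (hs ▸ hsort)).2
          have hlen' : (rest.set k x).length ≤ n := by simpa using hrlen
          have hv' : (PySem.List.min? menores (fun y => y)).getD 0 = v := by
            rw [hvsome]; rfl
          show ((PySem.List.min? menores (fun y => y)).getD 0) ::
              selPos (rest.set ((PySem.List.index? rest ((PySem.List.min? menores (fun y => y)).getD 0)).getD 0) x)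
            = fillPos (x :: rest) s
          rw [hv', hksome]
          show v :: selPos (rest.set k x) = fillPos (x :: rest) s
          rw [ih (rest.set k x) t hlen' htperm htsort]
          rw [hs, hh0v]
          simp only [fillPos, hx, if_pos, List.headD_cons, List.tail_cons]
          congr 1
          · rw [hset, hrest]
            exact fillPos_swap_pos pre suf x v hx hvprop.1 t


-- The accumulator loop of the port computes selPos.
theorem selLoop_eq_selPos :
    ∀ (n : Nat) (xs out : List Int), xs.length ≤ n → selLoop xs out = out ++ selPos xs := by
  intro n
  induction n with
  | zero =>
    intro xs out h
    have hxs : xs = [] := List.eq_nil_of_length_eq_zero (Nat.le_zero.mp h)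
    subst hxs
    simp [selLoop, selPos]
  | succ n ih =>
    intro xs out h
    cases xs with
    | nil => simp [selLoop, selPos]
    | cons x rest =>
      have hr : rest.length ≤ n := by simpa using h
      rw [selLoop, selPos]
      by_cases hx : x ≤ 0
      · simp only [if_pos hx]
        rw [ih rest (out ++ [x]) hr]
        simp
      · simp only [if_neg hx]
        by_cases hm : (rest.filter (fun y => decide (0 < y) && decide (y < x))).isEmpty
        · simp only [if_pos hm]
          rw [ih rest (out ++ [x]) hr]
          simp
        · simp only [if_neg hm]
          show selLoop
              (rest.set ((PySem.List.index? rest ((PySem.List.min? (rest.filter (fun y => decide (0 < y) && decide (y < x))) (fun y => y)).getD 0)).getD 0) x)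
              (out ++ [(PySem.List.min? (rest.filter (fun y => decide (0 < y) && decide (y < x))) (fun y => y)).getD 0])
            = out ++ ((PySem.List.min? (rest.filter (fun y => decide (0 < y) && decide (y < x))) (fun y => y)).getD 0
              :: selPos (rest.set ((PySem.List.index? rest ((PySem.List.min? (rest.filter (fun y => decide (0 < y) && decide (y < x))) (fun y => y)).getD 0)).getD 0) x))
          rw [ih _ _ (by simpa using hr)]
          simp

-- ===== VERDICT (by name: the statement is the Claim_ definition above) =====
theorem ordena_positivos_spec : Claim_equal_ordena_positivos := by
  intro lista _
  unfold Spec_ordena_positivos ordena_positivos ordena_positivos_alt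
  have hperm := PySem.List.sorted_perm (lista.filter (fun x => decide (x > 0))) (fun x : Int => x) false
  have hlenA : (lista.filter (fun x => decide (x > 0))).length
      ≤ (PySem.List.sorted (lista.filter (fun x => decide (x > 0))) (fun x : Int => x) false).length := by
    rw [hperm.length_eq]
  have hA := loopA (PySem.List.sorted (lista.filter (fun x => decide (x > 0))) (fun x : Int => x) false)
      lista [] 0 (by simp only [List.drop_zero]; exact hlenA)
  have hsortP : (PySem.List.sorted (lista.filter (fun x => decide (x > 0))) (fun x : Int => x) false).Pairwise (· ≤ ·) := by
    have := PySem.List.sorted_pairwise (lista.filter (fun x => decide (x > 0))) (fun x : Int => x)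
    simpa using this
  have hB := selPos_eq_fillPos lista.length lista
      (PySem.List.sorted (lista.filter (fun x => decide (x > 0))) (fun x : Int => x) false)
      (Nat.le_refl _) hperm hsortP
  have hB2 := selLoop_eq_selPos lista.length lista [] (Nat.le_refl _)
  simp only [List.nil_append, List.length_nil] at hA hB2
  rw [← List.range_eq_range', List.drop_zero] at hA
  rw [hA, hB2, hB]
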